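-- pv_equiv track=rewrite | github.com/mohits1005/DSAlgo | backtracking2/vertical-horizontal-sums.py | getRowColMaxArrSum
-- ===== SOURCE A (Python) =====
-- def getRowColMaxArrSum(A,B,C,i,j):
--     ## row max
--     sum = 0
--     start = -1
--     end = -1
--     rmax = 0
--     for n in range(0, len(B[i])):
--         if sum + B[i][n] > sum:
--             if sum == 0:
--                 start = n
--                 end = n
--                 sum = B[i][n]
--             else:
--                 end = n
--                 sum += B[i][n]
--         else:
--             if sum == 0:
--                 pass
--             else:
--                 if sum > rmax:
--                     rmax = sum
--                 sum = 0
--                 start = -1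
--                 end = -1
--         if n == len(B[i])-1 and end == n:
--             if sum > rmax:
--                 rmax = sum
--     # col max
--     sum = 0
--     start = -1
--     end = -1
--     cmax = 0
--     for m in range(0, len(B)):
--         if sum + B[m][j] > sum:
--             if sum == 0:
--                 start = m
--                 end = m
--                 sum = B[m][j]
--             else:
--                 end = m
--                 sum += B[m][j]
--         else:
--             if sum == 0:
--                 pass
--             else:
--                 if sum > cmax:
--                     cmax = sum
--                 sum = 0
--                 start = -1
--                 end = -1
--         if m == len(B)-1 and end == m:
--             if sum > cmax:
--                 cmax = sum
--     return (rmax > C or cmax > C)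
-- ===== SOURCE B (Python) =====
-- def _best(seq):
--     # partition into chunks separated by non-positive elements, then map-sum-max
--     runs = []
--     cur = []
--     for x in seq:
--         if x > 0:
--             cur.append(x)
--         else:
--             runs.append(cur)
--             cur = []
--     runs.append(cur)
--     sums = [sum(r) for r in runs]
--     return max(sums, default=0)
--
-- def getRowColMaxArrSum(A, B, C, i, j):
--     col = [row[j] for row in B]
--     return _best(B[i]) > C or _best(col) > C
-- ===== Notes on version B (the rewrite author's own statement) =====
-- stated objective: simpler
-- what changed: Replaces the running-accumulator with reset/flush logic and start/end bookkeeping by a partition-into-chunks-at-nonpositive-separators pass followed by map-sum and max with default 0, applied to the row and to the extracted column.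
import Mathlib
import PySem

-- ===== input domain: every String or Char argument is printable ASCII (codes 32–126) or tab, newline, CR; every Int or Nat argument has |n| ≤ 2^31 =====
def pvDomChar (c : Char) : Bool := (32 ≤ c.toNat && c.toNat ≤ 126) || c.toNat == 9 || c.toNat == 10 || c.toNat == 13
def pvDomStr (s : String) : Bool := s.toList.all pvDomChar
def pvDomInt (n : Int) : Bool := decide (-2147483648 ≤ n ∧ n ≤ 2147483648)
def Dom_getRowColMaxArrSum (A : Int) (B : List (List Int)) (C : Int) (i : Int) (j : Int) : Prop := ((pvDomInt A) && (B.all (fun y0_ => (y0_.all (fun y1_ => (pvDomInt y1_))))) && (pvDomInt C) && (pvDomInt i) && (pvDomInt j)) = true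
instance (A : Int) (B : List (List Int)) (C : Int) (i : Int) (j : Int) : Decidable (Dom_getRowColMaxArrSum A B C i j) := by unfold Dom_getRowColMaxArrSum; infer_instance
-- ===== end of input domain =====

-- B replaces A's running accumulator with reset/flush and start/end bookkeeping by a
-- partition-into-chunks-at-nonpositive-separators pass, then map-sum, then max (objective: simpler).

-- ===== PORT A =====
-- the shared body of A's two identical loops (state = (sum, start, end, rmax); element access via g)
def pvBodyA (g : Int → Int) (L : Int) (st : Int × Int × Int × Int) (n : Int) : Int × Int × Int × Int :=
  let x := g n
  let t : Int × Int × Int × Int :=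
    if st.1 + x > st.1 then
      if st.1 = 0 then (x, n, n, st.2.2.2)
      else (st.1 + x, st.2.1, n, st.2.2.2)
    else
      if st.1 = 0 then st
      else (0, -1, -1, if st.1 > st.2.2.2 then st.1 else st.2.2.2)
  if n = L - 1 ∧ t.2.2.1 = n then
    (t.1, t.2.1, t.2.2.1, if t.1 > t.2.2.2 then t.1 else t.2.2.2)
  else t

def pvLoopA (g : Int → Int) (L : Int) : Int :=
  ((PySem.List.pyRange 0 L 1).foldl (pvBodyA g L) (0, -1, -1, 0)).2.2.2

def getRowColMaxArrSum (A : Int) (B : List (List Int)) (C : Int) (i : Int) (j : Int) : Bool :=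
  let row := PySem.List.pyGetD B i []
  let rmax := pvLoopA (fun n => PySem.List.pyGetD row n 0) (row.length : Int)
  let cmax := pvLoopA (fun m => PySem.List.pyGetD (PySem.List.pyGetD B m []) j 0) (B.length : Int)
  decide (rmax > C) || decide (cmax > C)

-- ===== PORT B =====
-- one step of _best's partition loop: state = (runs, cur)
def pvStepB (acc : List (List Int) × List Int) (x : Int) : List (List Int) × List Int :=
  if x > 0 then (acc.1, acc.2 ++ [x]) else (acc.1 ++ [acc.2], [])

def pvBest (seq : List Int) : Int :=
  let p := seq.foldl pvStepB ([], [])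
  let runs := p.1 ++ [p.2]
  let sums := runs.map (fun r => r.sum)
  match sums with                               -- max(sums, default=0)
  | [] => 0
  | a :: l => l.foldl (fun u v => if v > u then v else u) a

def getRowColMaxArrSum_alt (A : Int) (B : List (List Int)) (C : Int) (i : Int) (j : Int) : Bool :=
  let col := B.map (fun row => PySem.List.pyGetD row j 0)
  decide (pvBest (PySem.List.pyGetD B i []) > C) || decide (pvBest col > C)

-- ===== PRECONDITION & SPEC =====
-- exactly the inputs where the Python A returns: i a valid (possibly negative) index into B,
-- and j a valid index into every row (A's column loop indexes every row)
def Pre_getRowColMaxArrSum (A : Int) (B : List (List Int)) (C : Int) (i : Int) (j : Int) : Prop :=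
  PySem.Raise.InRange B.length i ∧ ∀ row ∈ B, PySem.Raise.InRange row.length j
instance (A : Int) (B : List (List Int)) (C : Int) (i : Int) (j : Int) : Decidable (Pre_getRowColMaxArrSum A B C i j) := by unfold Pre_getRowColMaxArrSum; infer_instance

def pvWitness_getRowColMaxArrSum : Int × List (List Int) × Int × Int × Int := (0, [[1, -2], [3, 4]], 2, 0, 1)

def Spec_getRowColMaxArrSum (A : Int) (B : List (List Int)) (C : Int) (i : Int) (j : Int) (out : Bool) : Prop := out = getRowColMaxArrSum_alt A B C i j
instance (A : Int) (B : List (List Int)) (C : Int) (i : Int) (j : Int) (out : Bool) : Decidable (Spec_getRowColMaxArrSum A B C i j out) := by unfold Spec_getRowColMaxArrSum; infer_instance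

-- ===== CLAIM (what is proved, stated in full; the proofs are below) =====
def Claim_equal_getRowColMaxArrSum : Prop := ∀ (A : Int) (B : List (List Int)) (C : Int) (i : Int) (j : Int), Dom_getRowColMaxArrSum A B C i j → Pre_getRowColMaxArrSum A B C i j → Spec_getRowColMaxArrSum A B C i j (getRowColMaxArrSum A B C i j)

-- ===== LEMMAS AND PROOFS =====

-- reference value: pvSpec xs = (max sum over maximal runs of positive elements, sum of the leading positive run)
def pvSpec : List Int → Int × Int
  | [] => (0, 0)
  | x :: xs =>
    let p := pvSpec xs
    if x > 0 then (if x + p.2 > p.1 then x + p.2 else p.1, x + p.2) else (p.1, 0)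

theorem pvSpec_bounds (xs : List Int) : 0 ≤ (pvSpec xs).2 ∧ (pvSpec xs).2 ≤ (pvSpec xs).1 := by
  induction xs with
  | nil => simp [pvSpec]
  | cons x xs ih => simp only [pvSpec]; split_ifs <;> simp_all <;> omega

theorem pvLoopA_aux (g : Int → Int) (L : Int) (xs : List Int) :
    ∀ (b s st e r : Int), b + xs.length = L → 0 ≤ b → 0 ≤ s → 0 ≤ r →
    (∀ k : Nat, k < xs.length → g (b + k) = xs.getD k 0) →
    (0 < s → e = b - 1) → (s = 0 → e = -1) →
    (b = L → 0 < s → s ≤ r) →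
    ((PySem.List.pyRange b L 1).foldl (pvBodyA g L) (s, st, e, r)).2.2.2
      = max r (max (s + (pvSpec xs).2) (pvSpec xs).1) := by
  induction xs with
  | nil =>
    intro b s st e r h1 h2 h3 h4 hidx h5 h6 h7
    have hbL : b = L := by simpa using h1
    rw [PySem.List.pyRange_one_eq_nil (by omega)]
    simp only [List.foldl_nil, pvSpec]
    by_cases hs : 0 < s
    · have := h7 hbL hs; omega
    · omega
  | cons x rest ih =>
    intro b s st e r h1 h2 h3 h4 hidx h5 h6 h7
    have hlen : b + (1 + (rest.length : Int)) = L := by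
      simp only [List.length_cons] at h1; push_cast at h1 ⊢; omega
    have hbL : b < L := by omega
    rw [PySem.List.pyRange_one_cons hbL]
    simp only [List.foldl_cons]
    have hx : g b = x := by have h0 := hidx 0 (by simp); simpa using h0
    have hidx' : ∀ k : Nat, k < rest.length → g ((b + 1) + k) = rest.getD k 0 := by
      intro k hk
      have hh := hidx (k + 1) (by simp; omega)
      have : b + ((k : Int) + 1) = (b + 1) + k := by ring
      simpa [this] using hh
    have hbd := pvSpec_bounds rest
    by_cases hpos : x > 0
    · have hc1 : s + x > s := by omega
      simp only [pvBodyA, hx, if_pos hc1]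
      by_cases hs : s = 0
      · simp only [if_pos hs]
        by_cases hb : b = L - 1
        · rw [if_pos ⟨hb, trivial⟩]
          have hrest : rest = [] := by
            cases rest with
            | nil => rfl
            | cons y ys => exfalso; simp only [List.length_cons] at hlen; push_cast at hlen; omega
          subst hrest
          rw [PySem.List.pyRange_one_eq_nil (by omega)]
          simp only [List.foldl_nil, pvSpec]
          split_ifs <;> omega
        · rw [if_neg (fun h => hb h.1)]
          rw [ih (b + 1) x b b r (by omega) (by omega) (by omega) h4 hidx'
              (fun _ => by omega) (fun h0 => absurd h0 (by omega)) (fun hh => absurd hh (by omega))]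
          simp only [pvSpec]
          split_ifs <;> omega
      · simp only [if_neg hs]
        by_cases hb : b = L - 1
        · rw [if_pos ⟨hb, trivial⟩]
          have hrest : rest = [] := by
            cases rest with
            | nil => rfl
            | cons y ys => exfalso; simp only [List.length_cons] at hlen; push_cast at hlen; omega
          subst hrest
          rw [PySem.List.pyRange_one_eq_nil (by omega)]
          simp only [List.foldl_nil, pvSpec]
          split_ifs <;> omega
        · rw [if_neg (fun h => hb h.1)]
          rw [ih (b + 1) (s + x) st b r (by omega) (by omega) (by omega) h4 hidx'
              (fun _ => by omega) (fun h0 => absurd h0 (by omega)) (fun hh => absurd hh (by omega))]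
          simp only [pvSpec]
          split_ifs <;> omega
    · have hc1 : ¬ (s + x > s) := by omega
      simp only [pvBodyA, hx, if_neg hc1]
      by_cases hs : s = 0
      · have he : e = -1 := h6 hs
        simp only [if_pos hs]
        rw [if_neg (by rintro ⟨-, hE⟩; omega)]
        rw [ih (b + 1) s st e r (by omega) (by omega) h3 h4 hidx'
            (fun h0 => absurd h0 (by omega)) (fun _ => he) (fun hh h0 => absurd h0 (by omega))]
        simp only [pvSpec, if_neg hpos]
        omega
      · simp only [if_neg hs]
        rw [if_neg (by rintro ⟨-, hE⟩; omega)]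
        rw [ih (b + 1) 0 (-1) (-1) (if s > r then s else r) (by omega) (by omega) (by omega) (by omega) hidx'
            (fun h0 => absurd h0 (by omega)) (fun _ => rfl) (fun hh h0 => absurd h0 (by omega))]
        simp only [pvSpec, if_neg hpos]
        split_ifs <;> omega

theorem pvLoopA_eq_spec (g : Int → Int) (xs : List Int)
    (h : ∀ k : Nat, k < xs.length → g (k : Int) = xs.getD k 0) :
    pvLoopA g (xs.length : Int) = (pvSpec xs).1 := by
  have hbd := pvSpec_bounds xs
  unfold pvLoopA
  rw [pvLoopA_aux g (xs.length : Int) xs 0 0 (-1) (-1) 0 (by simp) le_rfl le_rfl le_rfl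
      (fun k hk => by simpa using h k hk) (by omega) (fun _ => rfl) (by omega)]
  omega

def pvMX (l : List Int) : Int := l.foldr max 0

theorem pvMX_foldr (l : List Int) : ∀ c : Int, 0 ≤ c → l.foldr max c = max c (pvMX l) := by
  induction l with
  | nil => intro c hc; simp [pvMX]; omega
  | cons x t ih => intro c hc; simp only [List.foldr_cons, pvMX, ih c hc]; omega

theorem pvMX_snoc (runs : List (List Int)) (cur : List Int) :
    pvMX ((runs ++ [cur]).map (fun r => r.sum)) = max (pvMX (runs.map (fun r => r.sum))) (max cur.sum 0) := by
  simp only [List.map_append, List.map_cons, List.map_nil, pvMX, List.foldr_append, List.foldr_cons, List.foldr_nil]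
  rw [pvMX_foldr (runs.map (fun r => r.sum)) (max cur.sum 0) (by omega)]
  simp only [pvMX]; omega

theorem pvFoldl_ifmax (t : List Int) : ∀ a : Int, 0 ≤ a →
    t.foldl (fun u v => if v > u then v else u) a = max a (pvMX t) := by
  induction t with
  | nil => intro a ha; simp [pvMX]; omega
  | cons x t ih =>
    intro a ha
    simp only [List.foldl_cons]
    rw [ih _ (by omega : (0:Int) ≤ if x > a then x else a)]
    simp only [pvMX, List.foldr_cons]
    split_ifs <;> omega

theorem pvStepB_chunks (xs : List Int) : ∀ (runs : List (List Int)) (cur : List Int),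
    (∀ r ∈ runs, (0:Int) ≤ r.sum) → 0 ≤ cur.sum →
    (∀ r ∈ (xs.foldl pvStepB (runs, cur)).1, (0:Int) ≤ r.sum) ∧ 0 ≤ (xs.foldl pvStepB (runs, cur)).2.sum := by
  induction xs with
  | nil => intro runs cur h1 h2; simpa using ⟨h1, h2⟩
  | cons x xs ih =>
    intro runs cur h1 h2
    simp only [List.foldl_cons, pvStepB]
    by_cases hx : x > 0
    · simp only [if_pos hx]
      exact ih runs (cur ++ [x]) h1 (by simp [List.sum_append]; omega)
    · simp only [if_neg hx]
      refine ih (runs ++ [cur]) [] ?_ (by simp)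
      intro r hr
      rcases List.mem_append.mp hr with h | h
      · exact h1 r h
      · simp at h; subst h; exact h2

theorem pvStepB_aux (xs : List Int) : ∀ (runs : List (List Int)) (cur : List Int), 0 ≤ cur.sum →
    pvMX (((xs.foldl pvStepB (runs, cur)).1 ++ [(xs.foldl pvStepB (runs, cur)).2]).map (fun r => r.sum))
      = max (pvMX (runs.map (fun r => r.sum))) (max (cur.sum + (pvSpec xs).2) (pvSpec xs).1) := by
  induction xs with
  | nil =>
    intro runs cur hc
    simp only [List.foldl_nil, pvSpec]
    rw [pvMX_snoc]; omega
  | cons x xs ih =>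
    intro runs cur hc
    have hbd := pvSpec_bounds xs
    simp only [List.foldl_cons, pvStepB]
    by_cases hx : x > 0
    · simp only [if_pos hx]
      rw [ih runs (cur ++ [x]) (by simp [List.sum_append]; omega)]
      simp only [pvSpec, List.sum_append, List.sum_cons, List.sum_nil]
      split_ifs <;> omega
    · simp only [if_neg hx]
      rw [ih (runs ++ [cur]) [] (by simp), pvMX_snoc]
      simp only [pvSpec, if_neg hx, List.sum_nil]
      omega

theorem pvBest_eq_spec (xs : List Int) : pvBest xs = (pvSpec xs).1 := by
  have hbd := pvSpec_bounds xs
  have hch := pvStepB_chunks xs [] [] (by simp) (by simp)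
  have haux := pvStepB_aux xs [] [] (by simp)
  unfold pvBest
  cases hL : ((xs.foldl pvStepB ([], [])).1 ++ [(xs.foldl pvStepB ([], [])).2]).map (fun r => r.sum) with
  | nil => simp at hL
  | cons a l =>
    simp only [hL]
    have ha : 0 ≤ a := by
      have hmem : a ∈ ((xs.foldl pvStepB ([], [])).1 ++ [(xs.foldl pvStepB ([], [])).2]).map (fun r => r.sum) := by
        rw [hL]; exact List.mem_cons_self
      rcases List.mem_map.mp hmem with ⟨r, hr, rfl⟩
      rcases List.mem_append.mp hr with h | h
      · exact hch.1 r h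
      · simp at h; subst h; exact hch.2
    rw [pvFoldl_ifmax l a ha]
    have h2 : max a (pvMX l) = pvMX (a :: l) := by simp [pvMX]
    rw [h2, ← hL, haux]
    simp only [List.map_nil, pvMX, List.foldr_nil, List.sum_nil]
    omega

-- ===== VERDICT (by name: the statement is the Claim_ definition above) =====
theorem getRowColMaxArrSum_spec : Claim_equal_getRowColMaxArrSum := by
  intro A B C i j _ _
  unfold Spec_getRowColMaxArrSum getRowColMaxArrSum getRowColMaxArrSum_alt
  have hrow := pvLoopA_eq_spec (fun n => PySem.List.pyGetD (PySem.List.pyGetD B i []) n 0)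
      (PySem.List.pyGetD B i []) (fun k hk => by simp)
  have hcol := pvLoopA_eq_spec (fun m => PySem.List.pyGetD (PySem.List.pyGetD B m []) j 0)
      (B.map (fun row => PySem.List.pyGetD row j 0)) (fun k hk => by
        simp only [List.length_map] at hk
        simp [hk])
  rw [show ((B.map (fun row => PySem.List.pyGetD row j 0)).length : Int) = (B.length : Int) by simp] at hcol
  simp only [pvBest_eq_spec, hrow, hcol]
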